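-- pv_equiv track=rewrite | github.com/ExoticButters2005/CSE-231 | Project06/proj06.py | triangle_friendships_in_X_and_FB
-- ===== SOURCE A (Python) =====
-- def count_triangles(friends_dict):
--     triangles = set() # initializes empty set
--     for person, friends in friends_dict.items():
--         for friend in friends: # for each value in values of friends_dict
--             for friend_of_friend in friends_dict.get(friend, []):
--                 if friend_of_friend in friends and friend_of_friend != person: # if the friend of friend is in the friends list and not the same as the person
--                     triangle = tuple(sorted((person, friend, friend_of_friend))) # new triangle tuple
--                     triangles.add(triangle) # add the triangle to the set
--
--     return len(triangles) # return the number of triangle friendships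
--
-- def triangle_friendships_in_X_and_FB(people_in_X, people_in_FB):
--     merged_friends = {}
--     for person in people_in_X: # for each key in X
--         merged_friends[person] = set(people_in_X[person]).union(people_in_FB.get(person, [])) # merge the values of the key in X and FB
--
--     for person in people_in_FB:
--         if person not in merged_friends:
--             merged_friends[person] = set(people_in_FB[person]) # if the key in FB is not in the merged friends, add the values of the key in FB
--
--     return count_triangles(merged_friends) # returns the number of triangle friendships in the merged friends
-- ===== SOURCE B (Python) =====
-- def triangle_friendships_in_X_and_FB(people_in_X, people_in_FB):
--     merged = {p: set(fs) | set(people_in_FB.get(p, [])) for p, fs in people_in_X.items()}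
--     for p, fs in people_in_FB.items():
--         if p not in merged:
--             merged[p] = set(fs)
--     # reverse index: listed_by[x] = the set of keys whose friend list contains x
--     listed_by = {}
--     for p, nbrs in merged.items():
--         for f in nbrs:
--             listed_by.setdefault(f, set()).add(p)
--     empty = set()
--     triangles = set()
--     for f, nbrs in merged.items():
--         for g in nbrs:
--             for p in listed_by.get(f, empty) & listed_by.get(g, empty):
--                 if p != g:
--                     triangles.add(tuple(sorted((p, f, g))))
--     return len(triangles)
-- ===== Notes on version B (the rewrite author's own statement) =====
-- stated objective: alternative
-- what changed: A scans person->friend->friend-of-friend and tests membership in the friend list; B builds a reverse 'listed-by' index once and, for each directed edge (f,g), takes the intersection of the two listed-by sets to find the apex vertices.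
import Mathlib
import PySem

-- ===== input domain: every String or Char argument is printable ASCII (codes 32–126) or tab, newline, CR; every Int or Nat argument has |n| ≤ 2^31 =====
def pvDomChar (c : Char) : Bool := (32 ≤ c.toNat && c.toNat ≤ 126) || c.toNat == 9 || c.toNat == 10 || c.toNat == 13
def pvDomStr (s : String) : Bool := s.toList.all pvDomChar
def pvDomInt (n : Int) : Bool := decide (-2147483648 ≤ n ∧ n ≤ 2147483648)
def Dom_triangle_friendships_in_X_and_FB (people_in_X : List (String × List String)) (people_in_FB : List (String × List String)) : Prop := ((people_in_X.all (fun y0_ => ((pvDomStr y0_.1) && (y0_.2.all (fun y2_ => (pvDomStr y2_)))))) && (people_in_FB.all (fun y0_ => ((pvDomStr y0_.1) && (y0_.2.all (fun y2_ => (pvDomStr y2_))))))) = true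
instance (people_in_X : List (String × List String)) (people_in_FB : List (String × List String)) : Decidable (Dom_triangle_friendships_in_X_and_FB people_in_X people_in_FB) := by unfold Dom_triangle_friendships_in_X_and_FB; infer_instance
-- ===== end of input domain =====

-- B replaces A's person→friend→friend-of-friend scan by a reverse "listed-by" index and,
-- per directed edge (f,g), intersects the two listed-by sets (objective: alternative traversal).

-- ===== PORT A =====
-- count_triangles(friends_dict): the triangles set holds tuple(sorted(...)) as a sorted 3-element list;
-- only its size is returned, which does not depend on the (hash) iteration order of the sets involved.
def count_triangles (friends_dict : PySem.Dict String (List String)) : Int :=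
  let triangles : PySem.Set (List String) :=
    friends_dict.items.foldl (fun triangles pf =>
      pf.2.foldl (fun triangles friend =>
        (friends_dict.getD friend []).foldl (fun triangles fof =>
          if fof ∈ pf.2 ∧ fof ≠ pf.1 then
            PySem.Set.add triangles (PySem.List.sorted [pf.1, friend, fof] (fun x => x) false)
          else triangles) triangles) triangles) PySem.Set.empty
  (triangles.length : Int)

def triangle_friendships_in_X_and_FB (people_in_X : List (String × List String)) (people_in_FB : List (String × List String)) : Int :=
  -- the two arguments are Python dicts: normalise the pair lists exactly as dict(pairs) does
  let dX := PySem.Dict.ofList people_in_X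
  let dFB := PySem.Dict.ofList people_in_FB
  -- for person in people_in_X: merged[person] = set(people_in_X[person]).union(people_in_FB.get(person, []))
  -- (people_in_X[person] = dX.getD person [] since person is one of dX's keys)
  let merged := dX.keys.foldl (fun m person =>
      m.insert person (PySem.Set.union (PySem.Set.ofList (dX.getD person [])) (dFB.getD person []))) PySem.Dict.empty
  let merged := dFB.keys.foldl (fun m person =>
      if m.contains person then m else m.insert person (PySem.Set.ofList (dFB.getD person []))) merged
  count_triangles merged

-- ===== PORT B =====
-- merged = {p: set(fs) | set(people_in_FB.get(p, [])) for p, fs in people_in_X.items()} …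
def pvMergeB (people_in_X : List (String × List String)) (people_in_FB : List (String × List String)) : PySem.Dict String (PySem.Set String) :=
  let dX := PySem.Dict.ofList people_in_X
  let dFB := PySem.Dict.ofList people_in_FB
  let merged := dX.items.foldl (fun m pf =>
      m.insert pf.1 (PySem.Set.union (PySem.Set.ofList pf.2) (PySem.Set.ofList (dFB.getD pf.1 [])))) PySem.Dict.empty
  dFB.items.foldl (fun m pf =>
      if m.contains pf.1 then m else m.insert pf.1 (PySem.Set.ofList pf.2)) merged

-- listed_by.setdefault(f, set()).add(p): key f's set gains p (appended if new), f keeps / gets its position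
def pvListedBy (merged : PySem.Dict String (PySem.Set String)) : PySem.Dict String (PySem.Set String) :=
  merged.items.foldl (fun d pn =>
    pn.2.foldl (fun d f => d.insert f (PySem.Set.add (d.getD f []) pn.1)) d) PySem.Dict.empty

def triangle_friendships_in_X_and_FB_alt (people_in_X : List (String × List String)) (people_in_FB : List (String × List String)) : Int :=
  let merged := pvMergeB people_in_X people_in_FB
  let listed_by := pvListedBy merged
  let triangles : PySem.Set (List String) :=
    merged.items.foldl (fun triangles fn =>
      fn.2.foldl (fun triangles g =>
        (PySem.Set.inter (listed_by.getD fn.1 []) (listed_by.getD g [])).foldl (fun triangles p =>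
          if p ≠ g then
            PySem.Set.add triangles (PySem.List.sorted [p, fn.1, g] (fun x => x) false)
          else triangles) triangles) triangles) PySem.Set.empty
  (triangles.length : Int)

-- ===== PRECONDITION & SPEC =====
def Spec_triangle_friendships_in_X_and_FB (people_in_X : List (String × List String)) (people_in_FB : List (String × List String)) (out : Int) : Prop := out = triangle_friendships_in_X_and_FB_alt people_in_X people_in_FB
instance (people_in_X : List (String × List String)) (people_in_FB : List (String × List String)) (out : Int) : Decidable (Spec_triangle_friendships_in_X_and_FB people_in_X people_in_FB out) := by unfold Spec_triangle_friendships_in_X_and_FB; infer_instance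

-- ===== CLAIM (what is proved, stated in full; the proofs are below) =====
def Claim_equal_triangle_friendships_in_X_and_FB : Prop := ∀ (people_in_X : List (String × List String)) (people_in_FB : List (String × List String)), Dom_triangle_friendships_in_X_and_FB people_in_X people_in_FB → Spec_triangle_friendships_in_X_and_FB people_in_X people_in_FB (triangle_friendships_in_X_and_FB people_in_X people_in_FB)

-- ===== LEMMAS AND PROOFS =====

-- one fold step seen through a "view" V: if each step either keeps V or establishes Q, the fold does too
theorem pv_foldl_view_iff {σ β : Type} (F : σ → β → σ) (V : σ → Prop) (Q : β → Prop)
    (h : ∀ s y, V (F s y) ↔ V s ∨ Q y) (l : List β) (s : σ) :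
    V (l.foldl F s) ↔ V s ∨ ∃ y ∈ l, Q y := by
  induction l generalizing s with
  | nil => simp
  | cons y t ih => simp [List.foldl_cons, ih, h]; tauto

theorem pv_foldl_pres {σ β : Type} (F : σ → β → σ) (P : σ → Prop)
    (h : ∀ s y, P s → P (F s y)) (l : List β) (s : σ) : P s → P (l.foldl F s) := by
  induction l generalizing s with
  | nil => exact id
  | cons y t ih => intro hs; exact ih _ (h _ _ hs)


-- proof-side names for the triangle sets the two ports build
def pvTrisA (d : PySem.Dict String (List String)) : PySem.Set (List String) :=
  d.items.foldl (fun s pf =>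
    pf.2.foldl (fun s f =>
      (d.getD f []).foldl (fun s g =>
        if g ∈ pf.2 ∧ g ≠ pf.1 then
          PySem.Set.add s (PySem.List.sorted [pf.1, f, g] (fun x => x) false)
        else s) s) s) PySem.Set.empty

def pvTrisB (merged listed_by : PySem.Dict String (PySem.Set String)) : PySem.Set (List String) :=
  merged.items.foldl (fun s fn =>
    fn.2.foldl (fun s g =>
      (PySem.Set.inter (listed_by.getD fn.1 []) (listed_by.getD g [])).foldl (fun s p =>
        if p ≠ g then
          PySem.Set.add s (PySem.List.sorted [p, fn.1, g] (fun x => x) false)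
        else s) s) s) PySem.Set.empty

theorem pv_union_ofList (s : PySem.Set String) (t : List String) :
    PySem.Set.union s (PySem.Set.ofList t) = PySem.Set.union s t := by
  simp [PySem.Set.union, PySem.Set.update_eq_append_filter, PySem.Set.ofList_ofList]

-- A's two merge loops (over dict KEYS, looking the values up) build the same dict as B's (over ITEMS)
theorem pv_merge_eq (X FB : List (String × List String)) :
    (PySem.Dict.ofList FB).keys.foldl
      (fun m person => if m.contains person then m
        else m.insert person (PySem.Set.ofList ((PySem.Dict.ofList FB).getD person [])))
      ((PySem.Dict.ofList X).keys.foldl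
        (fun m person => m.insert person
          (PySem.Set.union (PySem.Set.ofList ((PySem.Dict.ofList X).getD person []))
            ((PySem.Dict.ofList FB).getD person []))) PySem.Dict.empty)
    = pvMergeB X FB := by
  unfold pvMergeB
  simp only [PySem.Dict.keys, List.foldl_map]
  have h1 : ((PySem.Dict.ofList X).items.foldl
      (fun m pf => m.insert pf.1
        (PySem.Set.union (PySem.Set.ofList ((PySem.Dict.ofList X).getD pf.1 []))
          ((PySem.Dict.ofList FB).getD pf.1 []))) PySem.Dict.empty)
      = ((PySem.Dict.ofList X).items.foldl
      (fun m pf => m.insert pf.1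
        (PySem.Set.union (PySem.Set.ofList pf.2)
          (PySem.Set.ofList ((PySem.Dict.ofList FB).getD pf.1 [])))) PySem.Dict.empty) := by
    apply PySem.List.foldl_congr_mem
    intro acc pf hpf
    have hv : (PySem.Dict.ofList X).getD pf.1 [] = pf.2 :=
      PySem.Dict.getD_of_mem_items _ (by exact hpf) (PySem.Dict.nodup_keys_ofList X) []
    rw [hv, pv_union_ofList]
  rw [h1]
  apply PySem.List.foldl_congr_mem
  intro acc pf hpf
  have hv : (PySem.Dict.ofList FB).getD pf.1 [] = pf.2 :=
    PySem.Dict.getD_of_mem_items _ (by exact hpf) (PySem.Dict.nodup_keys_ofList FB) []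
  rw [hv]

theorem pv_merge_nodup_keys (X FB : List (String × List String)) :
    (pvMergeB X FB).keys.Nodup := by
  unfold pvMergeB
  dsimp only
  refine pv_foldl_pres _ (fun m : PySem.Dict String (PySem.Set String) => m.keys.Nodup) ?_ _ _ ?_
  · intro m pf hm
    by_cases h : m.contains pf.1 = true
    · simpa [h] using hm
    · simpa [h] using PySem.Dict.nodup_keys_insert _ _ _ hm
  · refine pv_foldl_pres _ (fun m : PySem.Dict String (PySem.Set String) => m.keys.Nodup) ?_ _ _ ?_
    · intro m pf hm; exact PySem.Dict.nodup_keys_insert _ _ _ hm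
    · exact PySem.Dict.nodup_keys_empty

-- items with nodup keys: two items with the same key are the same item
theorem pv_items_key_inj {ν : Type} (d : PySem.Dict String ν) (hnd : d.keys.Nodup)
    {pn qn : String × ν} (hp : pn ∈ d.items) (hq : qn ∈ d.items) (h : pn.1 = qn.1) : pn = qn := by
  have h1 : d.get? pn.1 = some pn.2 := PySem.Dict.get?_of_mem_items d hp hnd
  have h2 : d.get? qn.1 = some qn.2 := PySem.Dict.get?_of_mem_items d hq hnd
  rw [h, h2] at h1
  exact Prod.ext h (Option.some.inj h1).symm

-- membership through getD, for a dict with nodup keys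
theorem pv_mem_getD_iff (d : PySem.Dict String (List String)) (hnd : d.keys.Nodup) (f g : String) :
    g ∈ d.getD f [] ↔ ∃ fn ∈ d.items, fn.1 = f ∧ g ∈ fn.2 := by
  constructor
  · intro h
    cases hq : d.get? f with
    | none =>
        rw [PySem.Dict.getD_eq_get?_getD, hq] at h
        simp at h
    | some v =>
        refine ⟨(f, v), PySem.Dict.mem_items_of_get?_eq_some d hq, rfl, ?_⟩
        rwa [PySem.Dict.getD_eq_get?_getD, hq] at h
  · rintro ⟨fn, hmem, h1, h2⟩
    obtain ⟨k, v⟩ := fn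
    subst h1
    rw [PySem.Dict.getD_of_mem_items d hmem hnd]
    exact h2

-- the reverse index: p appears in listed_by[y] iff some item lists y among its friends and has key p
theorem pv_listedBy_inner (nb : List String) (d : PySem.Dict String (PySem.Set String))
    (p x y : String) :
    x ∈ (nb.foldl (fun d f => d.insert f (PySem.Set.add (d.getD f []) p)) d).getD y [] ↔
      x ∈ d.getD y [] ∨ (y ∈ nb ∧ x = p) := by
  have := pv_foldl_view_iff (fun d f => d.insert f (PySem.Set.add (d.getD f []) p))
      (fun d => x ∈ d.getD y []) (fun f => y = f ∧ x = p) ?_ nb d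
  · rw [this]
    constructor
    · rintro (h | ⟨f, hf, rfl, rfl⟩)
      · exact Or.inl h
      · exact Or.inr ⟨hf, rfl⟩
    · rintro (h | ⟨hy, rfl⟩)
      · exact Or.inl h
      · exact Or.inr ⟨y, hy, rfl, rfl⟩
  · intro d' f
    simp only [PySem.Dict.getD_insert]
    by_cases h : y = f
    · subst h
      simp [PySem.Set.mem_add]
    · simp [h]

theorem pv_mem_listedBy (merged : PySem.Dict String (PySem.Set String)) (x y : String) :
    x ∈ (pvListedBy merged).getD y [] ↔ ∃ pn ∈ merged.items, y ∈ pn.2 ∧ x = pn.1 := by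
  unfold pvListedBy
  have := pv_foldl_view_iff
      (fun d (pn : String × PySem.Set String) =>
        pn.2.foldl (fun d f => d.insert f (PySem.Set.add (d.getD f []) pn.1)) d)
      (fun d => x ∈ d.getD y []) (fun pn => y ∈ pn.2 ∧ x = pn.1) ?_ merged.items PySem.Dict.empty
  · rw [this]
    simp [PySem.Dict.getD_empty]
  · intro d pn
    exact pv_listedBy_inner pn.2 d pn.1 x y

-- what A's triple loop collects
theorem pv_mem_trisA (d : PySem.Dict String (List String)) (x : List String) :
    x ∈ pvTrisA d ↔ ∃ pn ∈ d.items, ∃ f ∈ pn.2, ∃ g ∈ d.getD f [],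
      (g ∈ pn.2 ∧ g ≠ pn.1) ∧ x = PySem.List.sorted [pn.1, f, g] (fun x => x) false := by
  unfold pvTrisA
  have h3 : ∀ (pf : String × List String) (f : String) (s : PySem.Set (List String)),
      x ∈ (d.getD f []).foldl (fun s g =>
        if g ∈ pf.2 ∧ g ≠ pf.1 then
          PySem.Set.add s (PySem.List.sorted [pf.1, f, g] (fun x => x) false) else s) s ↔
      x ∈ s ∨ ∃ g ∈ d.getD f [], (g ∈ pf.2 ∧ g ≠ pf.1) ∧
        x = PySem.List.sorted [pf.1, f, g] (fun x => x) false := by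
    intro pf f s
    refine pv_foldl_view_iff _ (fun s => x ∈ s) _ ?_ _ s
    intro s' g
    by_cases h : g ∈ pf.2 ∧ g ≠ pf.1
    · simp [h, PySem.Set.mem_add]
    · simp [h]
  have h2 : ∀ (pf : String × List String) (s : PySem.Set (List String)),
      x ∈ pf.2.foldl (fun s f => (d.getD f []).foldl (fun s g =>
          if g ∈ pf.2 ∧ g ≠ pf.1 then
            PySem.Set.add s (PySem.List.sorted [pf.1, f, g] (fun x => x) false) else s) s) s ↔
      x ∈ s ∨ ∃ f ∈ pf.2, ∃ g ∈ d.getD f [], (g ∈ pf.2 ∧ g ≠ pf.1) ∧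
        x = PySem.List.sorted [pf.1, f, g] (fun x => x) false := by
    intro pf s
    exact pv_foldl_view_iff _ (fun s => x ∈ s) _ (fun s f => h3 pf f s) _ s
  have h1 := pv_foldl_view_iff
      (fun s (pf : String × List String) => pf.2.foldl (fun s f =>
        (d.getD f []).foldl (fun s g =>
          if g ∈ pf.2 ∧ g ≠ pf.1 then
            PySem.Set.add s (PySem.List.sorted [pf.1, f, g] (fun x => x) false) else s) s) s)
      (fun s => x ∈ s)
      (fun pf => ∃ f ∈ pf.2, ∃ g ∈ d.getD f [], (g ∈ pf.2 ∧ g ≠ pf.1) ∧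
        x = PySem.List.sorted [pf.1, f, g] (fun x => x) false)
      (fun s pf => h2 pf s) d.items PySem.Set.empty
  rw [h1]
  simp [PySem.Set.empty]

-- what B's triple loop collects
theorem pv_mem_trisB (merged listed_by : PySem.Dict String (PySem.Set String)) (x : List String) :
    x ∈ pvTrisB merged listed_by ↔ ∃ fn ∈ merged.items, ∃ g ∈ fn.2, ∃ p,
      (p ∈ listed_by.getD fn.1 [] ∧ p ∈ listed_by.getD g []) ∧ p ≠ g ∧
      x = PySem.List.sorted [p, fn.1, g] (fun x => x) false := by
  unfold pvTrisB
  have h3 : ∀ (fn : String × PySem.Set String) (g : String) (s : PySem.Set (List String)),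
      x ∈ (PySem.Set.inter (listed_by.getD fn.1 []) (listed_by.getD g [])).foldl (fun s p =>
        if p ≠ g then
          PySem.Set.add s (PySem.List.sorted [p, fn.1, g] (fun x => x) false) else s) s ↔
      x ∈ s ∨ ∃ p ∈ PySem.Set.inter (listed_by.getD fn.1 []) (listed_by.getD g []), p ≠ g ∧
        x = PySem.List.sorted [p, fn.1, g] (fun x => x) false := by
    intro fn g s
    refine pv_foldl_view_iff _ (fun s => x ∈ s) _ ?_ _ s
    intro s' p
    by_cases h : p ≠ g
    · simp [h, PySem.Set.mem_add]
    · simp [h]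
  have h1 := pv_foldl_view_iff
      (fun s (fn : String × PySem.Set String) => fn.2.foldl (fun s g =>
        (PySem.Set.inter (listed_by.getD fn.1 []) (listed_by.getD g [])).foldl (fun s p =>
          if p ≠ g then
            PySem.Set.add s (PySem.List.sorted [p, fn.1, g] (fun x => x) false) else s) s) s)
      (fun s => x ∈ s)
      (fun fn => ∃ g ∈ fn.2, ∃ p ∈ PySem.Set.inter (listed_by.getD fn.1 []) (listed_by.getD g []),
        p ≠ g ∧ x = PySem.List.sorted [p, fn.1, g] (fun x => x) false)
      (fun s fn => pv_foldl_view_iff _ (fun s => x ∈ s) _ (fun s g => h3 fn g s) _ s) merged.items PySem.Set.empty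
  rw [h1]
  simp only [PySem.Set.empty, List.not_mem_nil, false_or]
  constructor
  · rintro ⟨fn, hfn, g, hg, p, hp, hpg, rfl⟩
    exact ⟨fn, hfn, g, hg, p, (PySem.Set.mem_inter _ _ _).1 hp, hpg, rfl⟩
  · rintro ⟨fn, hfn, g, hg, p, hp, hpg, rfl⟩
    exact ⟨fn, hfn, g, hg, p, (PySem.Set.mem_inter _ _ _).2 hp, hpg, rfl⟩

theorem pv_tris_nodup_A (d : PySem.Dict String (List String)) : (pvTrisA d).Nodup := by
  unfold pvTrisA
  apply pv_foldl_pres _ (fun s : PySem.Set (List String) => s.Nodup)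
  · intro s pf hs
    apply pv_foldl_pres _ (fun s : PySem.Set (List String) => s.Nodup) _ _ _ hs
    intro s f hs
    apply pv_foldl_pres _ (fun s : PySem.Set (List String) => s.Nodup) _ _ _ hs
    intro s g hs
    split_ifs
    · exact PySem.Set.nodup_add _ _ hs
    · exact hs
  · exact List.nodup_nil

theorem pv_tris_nodup_B (merged listed_by : PySem.Dict String (PySem.Set String)) :
    (pvTrisB merged listed_by).Nodup := by
  unfold pvTrisB
  apply pv_foldl_pres _ (fun s : PySem.Set (List String) => s.Nodup)
  · intro s fn hs
    apply pv_foldl_pres _ (fun s : PySem.Set (List String) => s.Nodup) _ _ _ hs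
    intro s g hs
    apply pv_foldl_pres _ (fun s : PySem.Set (List String) => s.Nodup) _ _ _ hs
    intro s p hs
    split_ifs
    · exact PySem.Set.nodup_add _ _ hs
    · exact hs
  · exact List.nodup_nil

-- the two loops collect the same triangles
theorem pv_tris_iff (X FB : List (String × List String)) (x : List String) :
    x ∈ pvTrisA (pvMergeB X FB) ↔ x ∈ pvTrisB (pvMergeB X FB) (pvListedBy (pvMergeB X FB)) := by
  have hnd := pv_merge_nodup_keys X FB
  rw [pv_mem_trisA, pv_mem_trisB]
  constructor
  · rintro ⟨pn, hpn, f, hf, g, hg, ⟨hg2, hgp⟩, rfl⟩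
    obtain ⟨fn, hfn, hfn1, hgfn⟩ := (pv_mem_getD_iff _ hnd f g).1 hg
    refine ⟨fn, hfn, g, hgfn, pn.1, ⟨?_, ?_⟩, ?_, ?_⟩
    · rw [hfn1, pv_mem_listedBy]; exact ⟨pn, hpn, hf, rfl⟩
    · rw [pv_mem_listedBy]; exact ⟨pn, hpn, hg2, rfl⟩
    · exact fun h => hgp h.symm
    · rw [hfn1]
  · rintro ⟨fn, hfn, g, hgfn, p, ⟨hpf, hpg⟩, hpg2, rfl⟩
    obtain ⟨pn, hpn, hfpn, hp1⟩ := (pv_mem_listedBy _ p fn.1).1 hpf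
    obtain ⟨qn, hqn, hgqn, hp2⟩ := (pv_mem_listedBy _ p g).1 hpg
    have hpq : pn = qn := pv_items_key_inj _ hnd hpn hqn (by rw [← hp1, ← hp2])
    subst hpq
    refine ⟨pn, hpn, fn.1, hfpn, g, ?_, ⟨hgqn, ?_⟩, ?_⟩
    · exact (pv_mem_getD_iff _ hnd fn.1 g).2 ⟨fn, hfn, rfl, hgfn⟩
    · rw [← hp1]; exact fun h => hpg2 h.symm
    · rw [hp1]

-- ===== VERDICT (by name: the statement is the Claim_ definition above) =====
theorem triangle_friendships_in_X_and_FB_spec : Claim_equal_triangle_friendships_in_X_and_FB := by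
  intro X FB _
  unfold Spec_triangle_friendships_in_X_and_FB
  have hA : triangle_friendships_in_X_and_FB X FB = ((pvTrisA (pvMergeB X FB)).length : Int) := by
    simp only [triangle_friendships_in_X_and_FB]
    rw [pv_merge_eq]
    rfl
  have hB : triangle_friendships_in_X_and_FB_alt X FB
      = ((pvTrisB (pvMergeB X FB) (pvListedBy (pvMergeB X FB))).length : Int) := rfl
  rw [hA, hB]
  have hperm : (pvTrisA (pvMergeB X FB)).Perm (pvTrisB (pvMergeB X FB) (pvListedBy (pvMergeB X FB))) :=
    (List.perm_ext_iff_of_nodup (pv_tris_nodup_A _) (pv_tris_nodup_B _ _)).2 (pv_tris_iff X FB)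
  exact_mod_cast congrArg Nat.cast hperm.length_eq
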